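-- pv_equiv track=rewrite | github.com/MForofontov/python_utils | iterable_functions/dictionary_operations/remove_empty_dicts_recursive.py | remove_empty_dicts_recursive
-- ===== SOURCE A (Python) =====
-- from typing import Any
--
-- def remove_empty_dicts_recursive(nested_dict: dict[Any, Any]) -> dict[Any, Any]:
--     """
--     Recursively removes empty dictionary entries from a nested dictionary.
--
--     Parameters
--     ----------
--     nested_dict : dict
--         The nested dictionary.
--
--     Returns
--     -------
--     dict
--         The nested dictionary with empty dictionaries removed.
--
--     Raises
--     ------
--     TypeError
--         If nested_dict is not a dictionary.
--     """
--     if not isinstance(nested_dict, dict):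
--         raise TypeError("nested_dict must be a dictionary")
--
--     def _remove_empty(d: dict[Any, Any]) -> dict[Any, Any]:
--         if isinstance(d, dict):
--             for key in list(d.keys()):
--                 d[key] = _remove_empty(d[key])
--                 if isinstance(d[key], dict) and not d[key]:
--                     del d[key]
--         return d
--
--     return _remove_empty(nested_dict)
-- ===== SOURCE B (Python) =====
-- def remove_empty_dicts_recursive(nested_dict):
--     if not isinstance(nested_dict, dict):
--         raise TypeError("nested_dict must be a dictionary")
--
--     def _clean(value):
--         # Non-mutating: rebuild each dict bottom-up, keeping only non-empty cleaned entries.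
--         if not isinstance(value, dict):
--             return value
--         return {k: c for k, c in ((k, _clean(v)) for k, v in value.items())
--                 if not (isinstance(c, dict) and not c)}
--
--     return _clean(nested_dict)
-- ===== Notes on version B (the rewrite author's own statement) =====
-- stated objective: simpler
-- what changed: A recursively mutates the dict in place (reassigning each key and deleting empty sub-dicts); B non-destructively rebuilds each dict with a single filtered comprehension over items(), returning a new dict and never mutating the argument.
import Mathlib
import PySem

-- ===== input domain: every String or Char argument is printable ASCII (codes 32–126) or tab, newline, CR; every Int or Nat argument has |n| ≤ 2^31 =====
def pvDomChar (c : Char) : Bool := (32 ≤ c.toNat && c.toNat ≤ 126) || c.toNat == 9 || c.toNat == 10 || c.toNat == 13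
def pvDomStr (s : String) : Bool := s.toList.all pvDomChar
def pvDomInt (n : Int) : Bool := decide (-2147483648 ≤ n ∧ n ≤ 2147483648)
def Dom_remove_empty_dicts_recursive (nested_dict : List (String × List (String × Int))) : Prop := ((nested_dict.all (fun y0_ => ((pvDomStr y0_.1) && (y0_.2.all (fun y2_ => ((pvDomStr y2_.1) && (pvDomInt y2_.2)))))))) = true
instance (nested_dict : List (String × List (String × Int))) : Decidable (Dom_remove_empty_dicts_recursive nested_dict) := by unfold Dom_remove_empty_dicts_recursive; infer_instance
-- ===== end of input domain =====

-- B rebuilds the cleaned dict non-destructively with a comprehension instead of A's in-place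
-- key deletion; equivalence is about the RETURN value only (A mutates its argument, B does not).

-- ===== PORT A =====
-- A's inner recursive call _remove_empty(d[key]) at this type: d[key] is the inner dict
-- (values are ints), so the loop writes each value back unchanged and deletes nothing.
def pyRemoveEmptyInner (d : PySem.Dict String Int) : PySem.Dict String Int :=
  d.keys.foldl (fun acc k =>
    -- d[key] = _remove_empty(d[key]); the value is an int, so _remove_empty returns it as is
    -- (getD's default is unreachable: every k comes from d.keys)
    acc.insert k (acc.getD k 0)) d

def remove_empty_dicts_recursive (nested_dict : List (String × List (String × Int))) : List (String × List (String × Int)) :=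
  let d := PySem.Dict.mk nested_dict
  (d.keys.foldl (fun acc k =>
    -- d[key] = _remove_empty(d[key])
    let v := pyRemoveEmptyInner (PySem.Dict.mk (acc.getD k []))
    let acc' := acc.insert k v.items
    -- if isinstance(d[key], dict) and not d[key]: del d[key]
    if (acc'.getD k []).isEmpty then acc'.erase k else acc') d).items

-- ===== PORT B =====
def remove_empty_dicts_recursive_alt (nested_dict : List (String × List (String × Int))) : List (String × List (String × Int)) :=
  nested_dict.filterMap (fun p =>
    -- c = _clean(v): v is an inner dict whose values are ints, so the comprehension
    -- rebuilds it entrywise (its filter never fires on int values)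
    let c := p.2.map (fun q => (q.1, q.2))
    -- keep (k, c) only if c is non-empty
    if c.isEmpty then none else some (p.1, c))

-- ===== PRECONDITION & SPEC =====
-- Pre_ is the dict representation invariant: the association list (and each inner one) has
-- pairwise-distinct keys — a Python dict can never present duplicate keys, so no input A
-- accepts is excluded.
def Pre_remove_empty_dicts_recursive (nested_dict : List (String × List (String × Int))) : Prop :=
  (nested_dict.map Prod.fst).Nodup ∧ ∀ p ∈ nested_dict, (p.2.map Prod.fst).Nodup
instance (nested_dict : List (String × List (String × Int))) : Decidable (Pre_remove_empty_dicts_recursive nested_dict) := by unfold Pre_remove_empty_dicts_recursive; infer_instance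

def pvWitness_remove_empty_dicts_recursive : (List (String × List (String × Int))) :=
  [("a", [("x", 1), ("y", 2)]), ("b", []), ("c", [("z", -3)])]

def Spec_remove_empty_dicts_recursive (nested_dict : List (String × List (String × Int))) (out : List (String × List (String × Int))) : Prop := out = remove_empty_dicts_recursive_alt nested_dict
instance (nested_dict : List (String × List (String × Int))) (out : List (String × List (String × Int))) : Decidable (Spec_remove_empty_dicts_recursive nested_dict out) := by unfold Spec_remove_empty_dicts_recursive; infer_instance

-- ===== CLAIM (what is proved, stated in full; the proofs are below) =====
def Claim_equal_remove_empty_dicts_recursive : Prop := ∀ (nested_dict : List (String × List (String × Int))), Dom_remove_empty_dicts_recursive nested_dict → Pre_remove_empty_dicts_recursive nested_dict → Spec_remove_empty_dicts_recursive nested_dict (remove_empty_dicts_recursive nested_dict)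

-- ===== LEMMAS AND PROOFS =====

-- Inserting a key's own current value leaves the dict unchanged (keys distinct).
theorem dict_insert_self_eq {ν : Type} (d : PySem.Dict String ν) (k : String) (v : ν)
    (hm : (k, v) ∈ d.items) (hnd : d.keys.Nodup) : d.insert k v = d := by
  apply PySem.Dict.ext
  rw [PySem.Dict.items_insert_of_contains]
  · conv_rhs => rw [← List.map_id d.items]
    apply List.map_congr_left
    intro p hp
    simp only [id]
    by_cases hk : p.1 == k
    · have hk' : p.1 = k := by simpa using hk
      have : p.2 = v := by
        have h1 := PySem.Dict.get?_of_mem_items d hm hnd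
        have h2 := PySem.Dict.get?_of_mem_items d (k := p.1) (v := p.2) hp hnd
        rw [hk'] at h2; rw [h1] at h2
        exact (Option.some_injective _ h2).symm
      subst hk'; rw [← this]; simp
    · simp [hk]
  · have h := PySem.Dict.mem_keys_of_mem_items d (p := (k, v)) hm
    simpa [PySem.Dict.contains_iff_mem_keys] using h

-- The inner loop of A writes every value back unchanged.
theorem pyRemoveEmptyInner_aux (d : PySem.Dict String Int) (hnd : d.keys.Nodup)
    (ks : List String) (h : ∀ k ∈ ks, ∃ v, (k, v) ∈ d.items) :
    ks.foldl (fun acc k => acc.insert k (acc.getD k 0)) d = d := by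
  induction ks with
  | nil => rfl
  | cons k ks ih =>
    obtain ⟨v, hv⟩ := h k (by simp)
    have hgd : d.getD k 0 = v := PySem.Dict.getD_of_mem_items d hv hnd 0
    simp only [List.foldl_cons, hgd, dict_insert_self_eq d k v hv hnd]
    exact ih (fun k hk => h k (by simp [hk]))

theorem pyRemoveEmptyInner_eq (d : PySem.Dict String Int) (hnd : d.keys.Nodup) :
    pyRemoveEmptyInner d = d := by
  unfold pyRemoveEmptyInner
  apply pyRemoveEmptyInner_aux d hnd
  intro k hk
  simp only [PySem.Dict.keys, List.mem_map] at hk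
  obtain ⟨p, hp, hpk⟩ := hk
  exact ⟨p.2, by simpa [← hpk] using hp⟩

theorem map_pair_id (v : List (String × Int)) : v.map (fun q => (q.1, q.2)) = v := by
  simp

-- Main invariant for A's outer loop: done already cleaned, ps still to process.
theorem outer_loop_eq (done : List (String × List (String × Int)))
    (ps : List (String × List (String × Int)))
    (hnd : ((done ++ ps).map Prod.fst).Nodup)
    (hinner : ∀ p ∈ ps, (p.2.map Prod.fst).Nodup) :
    (ps.map Prod.fst).foldl (fun acc k =>
        let v := pyRemoveEmptyInner (PySem.Dict.mk (acc.getD k []))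
        let acc' := acc.insert k v.items
        if (acc'.getD k []).isEmpty then acc'.erase k else acc')
      (PySem.Dict.mk (done ++ ps))
      = PySem.Dict.mk (done ++ ps.filterMap (fun p => if p.2.isEmpty then none else some p)) := by
  induction ps generalizing done with
  | nil => simp
  | cons p ps ih =>
    obtain ⟨k, v⟩ := p
    have hndkeys : ((PySem.Dict.mk (done ++ (k, v) :: ps)).keys).Nodup := by
      simpa [PySem.Dict.keys] using hnd
    have hmem : (k, v) ∈ (PySem.Dict.mk (done ++ (k, v) :: ps)).items := by
      show (k, v) ∈ done ++ (k, v) :: ps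
      simp
    have hgd : (PySem.Dict.mk (done ++ (k, v) :: ps)).getD k [] = v :=
      PySem.Dict.getD_of_mem_items _ hmem hndkeys []
    have hinnernd : (v.map Prod.fst).Nodup := hinner (k, v) (by simp)
    have hclean : pyRemoveEmptyInner (PySem.Dict.mk v) = PySem.Dict.mk v :=
      pyRemoveEmptyInner_eq _ (by simpa [PySem.Dict.keys] using hinnernd)
    have hitems : (PySem.Dict.mk v).items = v := rfl
    have hins : (PySem.Dict.mk (done ++ (k, v) :: ps)).insert k v
        = PySem.Dict.mk (done ++ (k, v) :: ps) :=
      dict_insert_self_eq _ k v hmem hndkeys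
    have hknotdone : ∀ q ∈ done, ¬ (q.1 == k) := by
      intro q hq hqk
      have hq1 : q.1 = k := by simpa using hqk
      have hnd2 := hnd
      rw [List.map_append, List.nodup_append] at hnd2
      exact hnd2.2.2 q.1 (List.mem_map_of_mem hq) k (by simp) hq1
    have hknotps : ∀ q ∈ ps, ¬ (q.1 == k) := by
      intro q hq hqk
      have hq1 : q.1 = k := by simpa using hqk
      have := hnd
      rw [List.map_append, List.nodup_append] at this
      have h2 := this.2.1
      simp only [List.map_cons, List.nodup_cons] at h2
      exact h2.1 (hq1 ▸ List.mem_map_of_mem hq)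
    simp only [List.map_cons, List.foldl_cons, hgd, hclean, hitems, hins]
    by_cases hv : v.isEmpty
    · have hv' : v = [] := by simpa [List.isEmpty_iff] using hv
      have herase : (PySem.Dict.mk (done ++ (k, v) :: ps)).erase k
          = PySem.Dict.mk (done ++ ps) := by
        apply PySem.Dict.ext
        simp only [PySem.Dict.erase, List.filter_append, List.filter_cons]
        rw [List.filter_eq_self.mpr (by intro q hq; simpa using hknotdone q hq),
            List.filter_eq_self.mpr (by intro q hq; simpa using hknotps q hq)]
        simp
      simp only [hv, if_true, herase]
      have hsub : List.Sublist (done ++ ps) (done ++ (k, v) :: ps) :=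
        (List.sublist_cons_self (k, v) ps).append_left done
      have hnd' : ((done ++ ps).map Prod.fst).Nodup := hnd.sublist (hsub.map Prod.fst)
      rw [ih done hnd' (fun q hq => hinner q (by simp [hq])), hv']
      simp
    · rw [if_neg hv]
      have heq : done ++ (k, v) :: ps = (done ++ [(k, v)]) ++ ps := by simp
      rw [heq, ih (done ++ [(k, v)]) (by rw [← heq]; exact hnd)
            (fun q hq => hinner q (by simp [hq]))]
      have hvne : v ≠ [] := by simpa [List.isEmpty_iff] using hv
      simp [hvne]

-- ===== VERDICT (by name: the statement is the Claim_ definition above) =====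
theorem remove_empty_dicts_recursive_spec : Claim_equal_remove_empty_dicts_recursive := by
  intro nd _ hpre
  unfold Spec_remove_empty_dicts_recursive remove_empty_dicts_recursive remove_empty_dicts_recursive_alt
  obtain ⟨hnd, hinner⟩ := hpre
  have hkeys : (PySem.Dict.mk nd).keys = nd.map Prod.fst := rfl
  simp only [hkeys]
  have := outer_loop_eq [] nd (by simpa using hnd) hinner
  simp only [List.nil_append] at this
  rw [this]
  have : PySem.Dict.items (PySem.Dict.mk (nd.filterMap (fun p => if p.2.isEmpty then none else some p))) = nd.filterMap (fun p => if p.2.isEmpty then none else some p) := rfl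
  rw [this]
  apply List.filterMap_congr
  intro p _
  simp only [map_pair_id]
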